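-- pv_equiv track=rewrite | github.com/Krouli-TUDUDU/Alg_4343_Gerashchenkova | Gerashchenkova_Mariya_4343_lb1/lb1.py | greedy_bound
-- ===== SOURCE A (Python) =====
-- def first_info(h, n):
--     min_h = h[0]
--     pos = 0
--     for i in range(1, n):
--         v = h[i]
--         if v < min_h:
--             min_h = v
--             pos = i
--
--     run = 1
--     i = pos + 1
--     while i < n and h[i] == min_h:
--         run += 1
--         i += 1
--
--     max_size = run
--     down = n - min_h
--     if max_size > down:
--         max_size = down
--
--     return pos, min_h, max_size
--
-- def greedy_bound(n):
--     h = [0] * n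
--     placed = []
--
--     while True:
--         pos, min_h, max_size = first_info(h, n)
--         if min_h == n:
--             return placed
--
--         s = max_size
--         if not placed and s == n:
--             s -= 1
--
--         for j in range(pos, pos + s):
--             h[j] += s
--
--         placed.append((min_h, pos, s))
-- ===== SOURCE B (Python) =====
-- def greedy_bound(n):
--     # Closed form of the greedy simulation: one block of size n-1 at column 0,
--     # then the last column is raised from 0 to n-1 one unit at a time,
--     # then every column is raised from n-1 to n left to right.
--     if n <= 0:
--         return []
--     res = [(0, 0, n - 1)]
--     res.extend((k, n - 1, 1) for k in range(n - 1))
--     res.extend((n - 1, j, 1) for j in range(n))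
--     return res
-- ===== Notes on version B (the rewrite author's own statement) =====
-- stated objective: faster
-- what changed: A simulates the whole placement process on a height array (repeated full min-scans plus range updates); B proves the process follows a fixed pattern and emits the result directly as a closed-form list: one (0,0,n-1) block, then (k,n-1,1) for k<n-1, then (n-1,j,1) for j<n.
-- outside the precondition, e.g. on greedy_bound(0): A raises IndexError, B returns []
import Mathlib
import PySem

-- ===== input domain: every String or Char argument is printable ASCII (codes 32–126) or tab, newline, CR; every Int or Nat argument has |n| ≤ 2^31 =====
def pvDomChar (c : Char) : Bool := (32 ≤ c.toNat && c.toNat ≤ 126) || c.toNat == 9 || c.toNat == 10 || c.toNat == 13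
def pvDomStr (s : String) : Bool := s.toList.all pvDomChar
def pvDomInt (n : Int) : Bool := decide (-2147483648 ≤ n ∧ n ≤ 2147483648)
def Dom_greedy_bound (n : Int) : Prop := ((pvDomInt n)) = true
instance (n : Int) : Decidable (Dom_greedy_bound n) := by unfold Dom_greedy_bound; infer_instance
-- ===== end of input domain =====

-- B replaces A's O(n^2) height-array simulation by the closed-form O(n) list the process provably produces.

-- ===== PORT A =====
-- first_info's min-scan: 'for i in range(1, n): v = h[i]; if v < min_h: min_h, pos = v, i'
-- (h[i] ported as pyGetD: every call has 0 <= i < n = len h, where it is exact)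
def gbMinScan (h : List Int) (n : Int) : Int × Int :=
  (PySem.List.pyRange 1 n 1).foldl
    (fun st i =>
      let v := PySem.List.pyGetD h i 0
      if v < st.1 then (v, i) else st)
    (PySem.List.pyGetD h 0 0, 0)

-- 'run = 1; i = pos + 1; while i < n and h[i] == min_h: run += 1; i += 1'
-- (the Nat argument of gbRunAux is exactly (n - i).toNat, so 'fuel = 0' IS the test 'i < n' failing)
def gbRunAux (h : List Int) (minH : Int) : Nat → Int → Int → Int
  | 0, run, _ => run
  | fuel + 1, run, i =>
    if PySem.List.pyGetD h i 0 = minH then gbRunAux h minH fuel (run + 1) (i + 1) else run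

def gbRunLoop (h : List Int) (n minH : Int) (run i : Int) : Int :=
  gbRunAux h minH (n - i).toNat run i

def gbFirstInfo (h : List Int) (n : Int) : Int × Int × Int :=
  let ms := gbMinScan h n
  let minH := ms.1
  let pos := ms.2
  let run := gbRunLoop h n minH 1 (pos + 1)
  let down := n - minH
  let maxSize := if run > down then down else run
  (pos, minH, maxSize)

-- 'for j in range(pos, pos + s): h[j] += s'  (indices always in range here; pySetD/pyGetD exact)
def gbAddRange (h : List Int) (pos s : Int) : List Int :=
  (PySem.List.pyRange pos (pos + s) 1).foldl
    (fun acc j => PySem.List.pySetD acc j (PySem.List.pyGetD acc j 0 + s)) h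

-- the 'while True' loop; fuel only makes it total: the loop returns after at most 2n+1
-- iterations (the proofs below go through the exact iteration count), fuel 2n+2 is never exhausted on Pre_
def gbLoop (fuel : Nat) (h : List Int) (placed : List (Int × Int × Int)) (n : Int) :
    List (Int × Int × Int) :=
  match fuel with
  | 0 => placed
  | fuel + 1 =>
    let t := gbFirstInfo h n
    let pos := t.1
    let minH := t.2.1
    let maxSize := t.2.2
    if minH = n then placed
    else
      let s := if placed = [] ∧ maxSize = n then maxSize - 1 else maxSize
      gbLoop fuel (gbAddRange h pos s) (placed ++ [(minH, pos, s)]) n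

def greedy_bound (n : Int) : List (Int × Int × Int) :=
  gbLoop (2 * n + 2).toNat (List.replicate n.toNat 0) [] n

-- ===== PORT B =====
def greedy_bound_alt (n : Int) : List (Int × Int × Int) :=
  if n ≤ 0 then []
  else
    (0, 0, n - 1) ::
      ((PySem.List.pyRange 0 (n - 1) 1).map (fun k => (k, n - 1, 1)) ++
       (PySem.List.pyRange 0 n 1).map (fun j => (n - 1, j, 1)))

-- ===== PRECONDITION & SPEC =====
-- Pre_ excludes exactly n <= 0, where A raises IndexError (h[0] on the empty height array); B returns [] there
def Pre_greedy_bound (n : Int) : Prop := 1 ≤ n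
instance (n : Int) : Decidable (Pre_greedy_bound n) := by unfold Pre_greedy_bound; infer_instance
def pvWitness_greedy_bound : Int := 3

def Spec_greedy_bound (n : Int) (out : List (Int × Int × Int)) : Prop := out = greedy_bound_alt n
instance (n : Int) (out : List (Int × Int × Int)) : Decidable (Spec_greedy_bound n out) := by
  unfold Spec_greedy_bound; infer_instance

-- ===== CLAIM (what is proved, stated in full; the proofs are below) =====
def Claim_equal_greedy_bound : Prop :=
  ∀ (n : Int), Dom_greedy_bound n → Pre_greedy_bound n → Spec_greedy_bound n (greedy_bound n)

-- ===== LEMMAS AND PROOFS =====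

theorem gb_get_blocks (L : List Int) (b : Nat) (d e : Int) (i : Int)
    (h0 : 0 ≤ i) (hi : i < (L.length : Int) + b) :
    PySem.List.pyGetD (L ++ List.replicate b d) i e =
      if i < (L.length : Int) then L.getD i.toNat e else d := by
  have hlen : (L ++ List.replicate b d).length = L.length + b := by simp
  rw [PySem.List.pyGetD_eq_getElem _ e h0 (by rw [hlen]; omega)]
  by_cases hc : i < (L.length : Int)
  · rw [if_pos hc, List.getElem_append_left (by omega)]
    exact (List.getD_eq_getElem L e (by omega)).symm
  · rw [if_neg hc, List.getElem_append_right (by omega)]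
    simp
theorem gb_foldl_fix {α β : Type} (l : List β) (f : α → β → α) (st : α)
    (h : ∀ x ∈ l, f st x = st) : l.foldl f st = st := by
  induction l with
  | nil => rfl
  | cons x t ih =>
    simp only [List.foldl_cons, h x (by simp)]
    exact ih (fun y hy => h y (by simp [hy]))

theorem gb_getD_replicate (n : Nat) (c e : Int) (t : Nat) (h : t < n) :
    (List.replicate n c).getD t e = c := by
  simp [List.getD, h]

theorem gb_minScan_blocks (a b : Nat) (c d : Int) (hb : 1 ≤ b) (hcd : a = 0 ∨ d < c) :
    gbMinScan (List.replicate a c ++ List.replicate b d) ((a : Int) + b) = (d, (a : Int)) := by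
  unfold gbMinScan
  have hget : ∀ i : Int, 0 ≤ i → i < (a : Int) + b →
      PySem.List.pyGetD (List.replicate a c ++ List.replicate b d) i 0 =
        if i < (a : Int) then c else d := by
    intro i h0 hi
    rw [gb_get_blocks _ b d 0 i h0 (by simpa using hi)]
    simp only [List.length_replicate]
    split
    · next hc => exact gb_getD_replicate a c 0 i.toNat (by omega)
    · rfl
  have hinit : PySem.List.pyGetD (List.replicate a c ++ List.replicate b d) 0 0 =
      if (0:Int) < (a : Int) then c else d := hget 0 le_rfl (by omega)
  by_cases ha : a = 0
  · subst ha
    rw [hinit]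
    simp only [Nat.cast_zero, zero_add]
    rw [if_neg (lt_irrefl (0:Int))]
    exact gb_foldl_fix _ _ _ (fun i hi => by
      rw [PySem.List.mem_pyRange_one] at hi
      have hv : PySem.List.pyGetD (List.replicate 0 c ++ List.replicate b d) i 0 = d := by
        rw [hget i (by omega) (by omega)]
        rw [if_neg (by omega)]
      simp only [hv]
      simp)
  · have ha1 : 1 ≤ a := Nat.one_le_iff_ne_zero.mpr ha
    have hdc : d < c := hcd.resolve_left ha
    rw [hinit, if_pos (by omega)]
    rw [PySem.List.pyRange_one_append 1 (a : Int) ((a:Int) + b) (by omega)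
      (by omega)]
    rw [List.foldl_append]
    rw [gb_foldl_fix (PySem.List.pyRange 1 (a:Int)) _ ((c:Int), (0:Int)) (fun i hi => by
      rw [PySem.List.mem_pyRange_one] at hi
      have hv : PySem.List.pyGetD (List.replicate a c ++ List.replicate b d) i 0 = c := by
        rw [hget i (by omega) (by omega)]
        rw [if_pos (by omega)]
      simp only [hv]
      simp)]
    rw [PySem.List.pyRange_one_cons (by omega)]
    rw [List.foldl_cons]
    have hva : PySem.List.pyGetD (List.replicate a c ++ List.replicate b d) (a:Int) 0 = d := by
      rw [hget (a:Int) (by positivity) (by omega)]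
      rw [if_neg (by omega)]
    simp only [hva]
    rw [if_pos hdc]
    exact gb_foldl_fix _ _ _ (fun i hi => by
      rw [PySem.List.mem_pyRange_one] at hi
      have hv : PySem.List.pyGetD (List.replicate a c ++ List.replicate b d) i 0 = d := by
        rw [hget i (by omega) (by omega)]
        rw [if_neg (by omega)]
      simp only [hv]
      simp)

theorem gb_runAux_blocks (a b : Nat) (c d : Int) :
    ∀ (t : Nat) (run i : Int), i + (t : Int) = (a : Int) + b → (a : Int) + 1 ≤ i →
    gbRunAux (List.replicate a c ++ List.replicate b d) d t run i = run + t := by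
  intro t
  induction t with
  | zero => intro run i _ _; simp [gbRunAux]
  | succ t ih =>
    intro run i hsum hlo
    have hv : PySem.List.pyGetD (List.replicate a c ++ List.replicate b d) i 0 = d := by
      rw [gb_get_blocks _ b d 0 i (by omega) (by simp; omega)]
      rw [if_neg (by simp; omega)]
    simp only [gbRunAux, hv, if_pos]
    rw [ih (run + 1) (i + 1) (by omega) (by omega)]
    push_cast
    ring

theorem gb_firstInfo_blocks (a b : Nat) (c d : Int) (hb : 1 ≤ b) (hcd : a = 0 ∨ d < c) :
    gbFirstInfo (List.replicate a c ++ List.replicate b d) ((a : Int) + b) =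
      ((a : Int), d,
        if (b : Int) > (a : Int) + b - d then (a : Int) + b - d else (b : Int)) := by
  unfold gbFirstInfo
  rw [gb_minScan_blocks a b c d hb hcd]
  simp only
  unfold gbRunLoop
  have ht : ((a : Int) + b - ((a : Int) + 1)).toNat = b - 1 := by omega
  rw [ht]
  rw [gb_runAux_blocks a b c d (b - 1) 1 ((a : Int) + 1) (by omega) (by omega)]
  have : (1 : Int) + ((b : Nat) - 1 : Nat) = (b : Int) := by omega
  rw [this]

theorem gb_addFold (v : Int) :
    ∀ (t : Nat) (b : Nat) (L : List Int) (d : Int), t ≤ b →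
    (PySem.List.pyRange (L.length : Int) ((L.length : Int) + t) 1).foldl
        (fun acc j => PySem.List.pySetD acc j (PySem.List.pyGetD acc j 0 + v))
        (L ++ List.replicate b d)
      = L ++ List.replicate t (d + v) ++ List.replicate (b - t) d := by
  intro t
  induction t with
  | zero =>
    intro b L d _
    rw [PySem.List.pyRange_one_eq_nil (by omega)]
    simp
  | succ t ih =>
    intro b L d ht
    have hb1 : 1 ≤ b := by omega
    rw [PySem.List.pyRange_one_cons (by omega)]
    rw [List.foldl_cons]
    have hv : PySem.List.pyGetD (L ++ List.replicate b d) (L.length : Int) 0 = d := by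
      rw [gb_get_blocks L b d 0 _ (by omega) (by omega)]
      rw [if_neg (by omega)]
    rw [hv]
    have hset : PySem.List.pySetD (L ++ List.replicate b d) (L.length : Int) (d + v) =
        (L ++ [d + v]) ++ List.replicate (b - 1) d := by
      have hrep : List.replicate b d = d :: List.replicate (b - 1) d := by
        conv_lhs => rw [show b = (b - 1) + 1 by omega, List.replicate_succ]
      rw [PySem.List.pySetD_natCast, hrep]
      simp
    rw [hset]
    have hlen : ((L.length : Int) + 1) = (((L ++ [d + v]).length : Int)) := by simp
    have hlen2 : ((L.length : Int) + (t + 1 : Nat)) = (((L ++ [d + v]).length : Int) + t) := by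
      simp; omega
    rw [hlen2, show ((L.length : Int) + 1) = ((L ++ [d + v]).length : Int) from hlen]
    rw [ih (b - 1) (L ++ [d + v]) d (by omega)]
    rw [show b - 1 - t = b - (t + 1) by omega]
    simp [List.replicate_succ]

theorem gb_addRange_blocks (t b : Nat) (L : List Int) (d : Int) (ht : t ≤ b) :
    gbAddRange (L ++ List.replicate b d) (L.length : Int) (t : Int) =
      L ++ List.replicate t (d + t) ++ List.replicate (b - t) d := by
  unfold gbAddRange
  exact gb_addFold (t : Int) t b L d ht

theorem gbLoop_end (m : Nat) (hm : 1 ≤ m) (f : Nat) (placed : List (Int × Int × Int)) :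
    gbLoop (f + 1) (List.replicate m ((m : Int))) placed (m : Int) = placed := by
  have hfi := gb_firstInfo_blocks 0 m 0 ((m : Int)) hm (Or.inl rfl)
  simp only [List.replicate_zero, List.nil_append, Nat.cast_zero, zero_add] at hfi
  simp only [gbLoop, hfi]
  simp

theorem gbLoop_start (m : Nat) (hm : 2 ≤ m) (f : Nat) :
    gbLoop (f + 1) (List.replicate m (0 : Int)) [] (m : Int) =
      gbLoop f (List.replicate (m - 1) ((m : Int) - 1) ++ [(0 : Int)])
        [(0, 0, (m : Int) - 1)] (m : Int) := by
  have hfi := gb_firstInfo_blocks 0 m 0 0 (by omega) (Or.inl rfl)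
  simp only [List.replicate_zero, List.nil_append, Nat.cast_zero, zero_add, sub_zero,
    gt_iff_lt, lt_irrefl, if_false] at hfi
  have hadd := gb_addRange_blocks (m - 1) m ([] : List Int) 0 (by omega)
  simp only [List.length_nil, Nat.cast_zero, List.nil_append, zero_add] at hadd
  have hc1 : ((m - 1 : Nat) : Int) = (m : Int) - 1 := by omega
  rw [hc1] at hadd
  rw [show m - (m - 1) = 1 by omega] at hadd
  simp only [List.replicate_one] at hadd
  simp only [gbLoop, hfi]
  rw [if_neg (by omega)]
  simp only [and_self, if_true, List.nil_append]
  rw [hadd]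

theorem gbLoop_phase1_step (m : Nat) (hm : 2 ≤ m) (k : Int) (_hk0 : 0 ≤ k) (hk : k < (m : Int) - 1)
    (f : Nat) (placed : List (Int × Int × Int)) :
    gbLoop (f + 1) (List.replicate (m - 1) ((m : Int) - 1) ++ [k]) placed (m : Int) =
      gbLoop f (List.replicate (m - 1) ((m : Int) - 1) ++ [k + 1])
        (placed ++ [(k, (m : Int) - 1, 1)]) (m : Int) := by
  have hc1 : ((m - 1 : Nat) : Int) = (m : Int) - 1 := by omega
  have hfi := gb_firstInfo_blocks (m - 1) 1 ((m : Int) - 1) k le_rfl (Or.inr hk)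
  rw [List.replicate_one, hc1] at hfi
  rw [show ((m : Int) - 1 + (1 : Nat)) = (m : Int) by push_cast; ring] at hfi
  rw [if_neg (by omega)] at hfi
  norm_num at hfi
  have hadd := gb_addRange_blocks 1 1 (List.replicate (m - 1) ((m : Int) - 1)) k le_rfl
  simp only [List.length_replicate, List.replicate_one, Nat.sub_self, List.replicate_zero,
    List.append_nil, Nat.cast_one] at hadd
  rw [hc1] at hadd
  simp only [gbLoop, hfi]
  rw [if_neg (by omega)]
  have hs : (if placed = [] ∧ (1 : Int) = (m : Int) then (1 : Int) - 1 else 1) = 1 := by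
    split
    · next hcond => omega
    · rfl
  simp only [hs]
  rw [hadd]

theorem gbLoop_phase2_step (m : Nat) (hm : 2 ≤ m) (j c : Nat) (hc : 1 ≤ c) (hjc : j + c = m)
    (f : Nat) (placed : List (Int × Int × Int)) :
    gbLoop (f + 1) (List.replicate j ((m : Int)) ++ List.replicate c ((m : Int) - 1)) placed
        (m : Int) =
      gbLoop f (List.replicate (j + 1) ((m : Int)) ++ List.replicate (c - 1) ((m : Int) - 1))
        (placed ++ [((m : Int) - 1, (j : Int), 1)]) (m : Int) := by
  have hfi := gb_firstInfo_blocks j c ((m : Int)) ((m : Int) - 1) hc (Or.inr (by omega))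
  rw [show ((j : Int) + (c : Nat)) = (m : Int) by omega] at hfi
  have hmax : (if (c : Int) > (m : Int) - ((m : Int) - 1) then (m : Int) - ((m : Int) - 1)
      else (c : Int)) = 1 := by
    split <;> omega
  rw [hmax] at hfi
  have hadd := gb_addRange_blocks 1 c (List.replicate j ((m : Int))) ((m : Int) - 1) hc
  simp only [List.length_replicate, List.replicate_one, Nat.cast_one] at hadd
  rw [show ((m : Int) - 1 + 1) = (m : Int) by ring] at hadd
  rw [show (List.replicate j ((m : Int)) ++ [(m : Int)] ++ List.replicate (c - 1) ((m : Int) - 1))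
      = (List.replicate (j + 1) ((m : Int)) ++ List.replicate (c - 1) ((m : Int) - 1)) by
    rw [List.replicate_succ', List.append_assoc]] at hadd
  simp only [gbLoop, hfi]
  rw [if_neg (by omega)]
  have hs : (if placed = [] ∧ (1 : Int) = (m : Int) then (1 : Int) - 1 else 1) = 1 := by
    split
    · next hcond => omega
    · rfl
  simp only [hs]
  rw [hadd]

theorem gbLoop_phase1 (m : Nat) (hm : 2 ≤ m) :
    ∀ (c k f : Nat) (placed : List (Int × Int × Int)), k + c + 1 = m →
    gbLoop (c + f) (List.replicate (m - 1) ((m : Int) - 1) ++ [(k : Int)]) placed (m : Int) =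
      gbLoop f (List.replicate m ((m : Int) - 1))
        (placed ++ (PySem.List.pyRange (k : Int) ((m : Int) - 1)).map
          (fun x => (x, (m : Int) - 1, 1))) (m : Int) := by
  intro c
  induction c with
  | zero =>
    intro k f placed hk
    have hc1 : ((k : Nat) : Int) = (m : Int) - 1 := by omega
    rw [PySem.List.pyRange_one_eq_nil (by omega)]
    rw [hc1]
    rw [show (List.replicate (m - 1) ((m : Int) - 1) ++ [(m : Int) - 1])
        = List.replicate m ((m : Int) - 1) by
      rw [← List.replicate_succ', show m - 1 + 1 = m by omega]]
    simp
  | succ c ih =>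
    intro k f placed hk
    rw [show c + 1 + f = (c + f) + 1 by omega]
    rw [gbLoop_phase1_step m hm (k : Int) (by positivity) (by omega) (c + f) placed]
    rw [show ((k : Int) + 1) = ((k + 1 : Nat) : Int) by push_cast; ring]
    rw [ih (k + 1) f _ (by omega)]
    rw [PySem.List.pyRange_one_cons (show (k : Int) < (m : Int) - 1 by omega)]
    simp

theorem gbLoop_phase2 (m : Nat) (hm : 2 ≤ m) :
    ∀ (c j f : Nat) (placed : List (Int × Int × Int)), j + c = m →
    gbLoop (c + (f + 1)) (List.replicate j ((m : Int)) ++ List.replicate c ((m : Int) - 1))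
        placed (m : Int) =
      placed ++ (PySem.List.pyRange (j : Int) (m : Int)).map
        (fun x => ((m : Int) - 1, x, 1)) := by
  intro c
  induction c with
  | zero =>
    intro j f placed hj
    rw [PySem.List.pyRange_one_eq_nil (by omega)]
    simp only [List.replicate_zero, List.append_nil, List.map_nil]
    rw [show j = m by omega, Nat.zero_add]
    rw [gbLoop_end m (by omega) f placed]
  | succ c ih =>
    intro j f placed hj
    rw [show c + 1 + (f + 1) = (c + (f + 1)) + 1 by omega]
    rw [gbLoop_phase2_step m hm j (c + 1) (by omega) (by omega) (c + (f + 1)) placed]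
    rw [show c + 1 - 1 = c by omega]
    rw [ih (j + 1) f _ (by omega)]
    rw [show ((j + 1 : Nat) : Int) = (j : Int) + 1 by push_cast; ring]
    rw [PySem.List.pyRange_one_cons (show (j : Int) < (m : Int) by omega)]
    simp

theorem gb_main_ge2 (m : Nat) (hm : 2 ≤ m) :
    greedy_bound (m : Int) = greedy_bound_alt (m : Int) := by
  unfold greedy_bound
  rw [show ((2 * (m : Int) + 2)).toNat = (2 * m + 1) + 1 by omega]
  rw [show ((m : Int)).toNat = m by omega]
  rw [gbLoop_start m hm (2 * m + 1)]
  rw [show 2 * m + 1 = (m - 1) + (m + 2) by omega]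
  have h1 := gbLoop_phase1 m hm (m - 1) 0 (m + 2) [(0, 0, (m : Int) - 1)] (by omega)
  norm_num at h1
  rw [h1]
  have h2 := gbLoop_phase2 m hm m 0 1
    ([(0, 0, (m : Int) - 1)] ++ (PySem.List.pyRange 0 ((m : Int) - 1)).map
      (fun x => (x, (m : Int) - 1, 1))) (by omega)
  norm_num at h2
  rw [show m + 2 = m + (1 + 1) from rfl]
  rw [h2]
  unfold greedy_bound_alt
  rw [if_neg (by omega)]

-- ===== VERDICT (by name: the statement is the Claim_ definition above) =====
theorem greedy_bound_spec : Claim_equal_greedy_bound := by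
  intro n _ hpre
  unfold Spec_greedy_bound
  unfold Pre_greedy_bound at hpre
  have hn : n = (n.toNat : Int) := (Int.toNat_of_nonneg (by omega)).symm
  rcases Nat.lt_or_ge n.toNat 2 with h2 | h2
  · have h1 : n = 1 := by omega
    subst h1; decide
  · rw [hn]; exact gb_main_ge2 n.toNat h2
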